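-- pv_equiv track=rewrite | github.com/haolunc/ARC-RL | reference_solutions/solutions/8403a5d5.py | transform
-- ===== SOURCE A (Python) =====
-- def transform(grid):
--     h = len(grid)
--     w = len(grid[0])
--
--     col_val = None
--     c0 = None
--     for i in range(h):
--         for j in range(w):
--             if grid[i][j] != 0:
--                 col_val = grid[i][j]
--                 c0 = j
--                 break
--         if col_val is not None:
--             break
--
--     out = [[0] * w for _ in range(h)]
--
--     col = c0
--     while col < w:
--         for r in range(h):
--             out[r][col] = col_val
--         col += 2
--
--     offset = 1
--     while c0 + offset < w:
--         col = c0 + offset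
--         if offset % 4 == 1:
--             out[0][col] = 5
--         elif offset % 4 == 3:
--             out[h - 1][col] = 5
--         offset += 1
--
--     return out
-- ===== SOURCE B (Python) =====
-- def transform(grid):
--     h, w = len(grid), len(grid[0])
--     col_val, c0 = next((v, j) for row in grid for j, v in enumerate(row[:w]) if v != 0)
--
--     def cell(r, c):
--         if c < c0:
--             return 0
--         d = c - c0
--         if d % 2 == 0:
--             return col_val
--         if d % 4 == 1 and r == 0:
--             return 5
--         if d % 4 == 3 and r == h - 1:
--             return 5
--         return 0
--
--     return [[cell(r, c) for c in range(w)] for r in range(h)]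
-- ===== Notes on version B (the rewrite author's own statement) =====
-- stated objective: simpler
-- what changed: B replaces A's mutate-in-place construction (zero grid, a while loop filling every second column, then a second while loop poking 5s by offset mod 4) with a single comprehension that computes each cell directly from a closed per-cell formula of (col - c0); the first-nonzero search becomes an enumerate/next generator expression.
import Mathlib
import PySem

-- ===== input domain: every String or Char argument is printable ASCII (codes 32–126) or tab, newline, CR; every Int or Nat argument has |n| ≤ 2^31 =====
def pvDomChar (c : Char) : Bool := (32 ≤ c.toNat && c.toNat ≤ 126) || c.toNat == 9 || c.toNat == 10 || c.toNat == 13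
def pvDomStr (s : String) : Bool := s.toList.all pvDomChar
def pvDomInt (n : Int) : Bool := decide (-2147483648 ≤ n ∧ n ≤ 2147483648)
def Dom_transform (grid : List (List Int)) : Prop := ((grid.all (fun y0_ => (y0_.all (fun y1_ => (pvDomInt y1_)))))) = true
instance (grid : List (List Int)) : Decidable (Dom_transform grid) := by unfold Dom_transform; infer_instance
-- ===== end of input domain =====

-- B builds each output cell directly from a closed per-cell formula (one pass, no mutation)
-- instead of A's mutate-a-zero-grid two-while-loop fill; objective: simpler, not faster.

-- ===== PORT A =====
-- inner `for j in range(w): if grid[i][j] != 0: … break` (row read by index; in-range on Pre_)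
def pyFindInRow (row : List Int) (js : List Nat) : Option (Int × Nat) :=
  match js with
  | [] => none
  | j :: rest => if row.getD j 0 ≠ 0 then some (row.getD j 0, j) else pyFindInRow row rest

-- outer `for i in range(h): … if col_val is not None: break`
def pyFindFirst (rows : List (List Int)) (w : Nat) : Option (Int × Nat) :=
  match rows with
  | [] => none
  | row :: rest =>
    match pyFindInRow row (List.range w) with
    | some p => some p
    | none => pyFindFirst rest w

-- `for r in range(h): out[r][col] = col_val`
def setColAll (out : List (List Int)) (col : Nat) (v : Int) : List (List Int) :=
  out.map (fun row => row.set col v)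

-- `while col < w: …; col += 2`
def fillCols (out : List (List Int)) (col w : Nat) (v : Int) : List (List Int) :=
  if col < w then fillCols (setColAll out col v) (col + 2) w v else out
termination_by w - col

-- `while c0 + offset < w: …; offset += 1`
def fillFives (out : List (List Int)) (c0 offset w h : Nat) : List (List Int) :=
  if c0 + offset < w then
    let col := c0 + offset
    let out' := if offset % 4 = 1 then out.modify 0 (fun row => row.set col 5)
      else if offset % 4 = 3 then out.modify (h - 1) (fun row => row.set col 5)
      else out
    fillFives out' c0 (offset + 1) w h
  else out
termination_by w - (c0 + offset)

def transform (grid : List (List Int)) : List (List Int) :=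
  let h := grid.length
  let w := (grid.getD 0 []).length
  match pyFindFirst grid w with
  | none => []   -- Python raises TypeError here (no nonzero found); excluded by Pre_transform
  | some (v, c0) =>
    let out0 := List.replicate h (List.replicate w (0 : Int))
    fillFives (fillCols out0 c0 w v) c0 1 w h

-- ===== PORT B =====
-- `next((v, j) for row in grid for j, v in enumerate(row[:w]) if v != 0)`
def altFind (rows : List (List Int)) (w : Nat) : Option (Int × Nat) :=
  rows.findSome? (fun row => ((row.take w).zipIdx).find? (fun p => p.1 != 0))

-- the per-cell closed formula `cell(r, c)`
def altCell (h c0 : Nat) (v : Int) (r c : Nat) : Int :=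
  if c < c0 then 0
  else
    let d := c - c0
    if d % 2 = 0 then v
    else if d % 4 = 1 ∧ r = 0 then 5
    else if d % 4 = 3 ∧ r = h - 1 then 5
    else 0

def transform_alt (grid : List (List Int)) : List (List Int) :=
  let h := grid.length
  let w := (grid.getD 0 []).length
  match altFind grid w with
  | none => []   -- Python raises StopIteration here; excluded by Pre_transform
  | some (v, c0) =>
    (List.range h).map (fun r => (List.range w).map (fun c => altCell h c0 v r c))

-- ===== PRECONDITION & SPEC =====
-- Pre_ is exactly the domain on which Python A returns normally: a non-empty grid with a row
-- holding a nonzero among its first w entries (w = first row's width) such that every earlier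
-- row is at least w wide and zero on its first w entries.  Outside it A raises: IndexError on
-- an empty grid or on a too-short row met during the scan, TypeError when no nonzero is found.
def Pre_transform (grid : List (List Int)) : Prop :=
  grid ≠ [] ∧
    ∃ i < grid.length,
      (((grid.getD i []).take (grid.getD 0 []).length).any (fun v => v != 0)) = true ∧
        ∀ k < i, (grid.getD 0 []).length ≤ (grid.getD k []).length ∧
          (((grid.getD k []).take (grid.getD 0 []).length).all (fun v => v == 0)) = true
instance (grid : List (List Int)) : Decidable (Pre_transform grid) := by
  unfold Pre_transform; infer_instance

def pvWitness_transform : List (List Int) := [[0, 1], [0, 0]]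

def Spec_transform (grid : List (List Int)) (out : List (List Int)) : Prop := out = transform_alt grid
instance (grid : List (List Int)) (out : List (List Int)) : Decidable (Spec_transform grid out) := by unfold Spec_transform; infer_instance

-- ===== CLAIM (what is proved, stated in full; the proofs are below) =====
def Claim_equal_transform : Prop := ∀ (grid : List (List Int)), Dom_transform grid → Pre_transform grid → Spec_transform grid (transform grid)

-- ===== LEMMAS AND PROOFS =====

-- cell access and shape of an output grid
def cellE (out : List (List Int)) (r c : Nat) : Int := (out.getD r []).getD c 0

def Shape (out : List (List Int)) (h w : Nat) : Prop :=
  out.length = h ∧ ∀ row ∈ out, row.length = w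

-- A's index scan of one row equals B's enumerate scan of row[:w]
theorem findInRow_eq_aux (row : List Int) :
    ∀ (n j : Nat), pyFindInRow row (List.range' j n) =
      (((row.drop j).take n).zipIdx j).find? (fun p => p.1 != 0) := by
  intro n
  induction n with
  | zero => intro j; simp [pyFindInRow]
  | succ n ih =>
    intro j
    rw [List.range'_succ]
    by_cases hj : j < row.length
    · rw [List.drop_eq_getElem_cons hj]
      simp only [pyFindInRow, List.take_succ_cons, List.zipIdx_cons, List.find?_cons]
      rw [List.getD_eq_getElem row 0 hj]
      by_cases hz : row[j] ≠ 0
      · have hb : (row[j] != 0) = true := by simpa using hz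
        simp [hz, hb]
      · simp only [ne_eq, not_not] at hz
        simp [hz, ih (j + 1)]
    · have hd : row.drop j = [] := List.drop_eq_nil_of_le (by omega)
      have hd' : row.drop (j + 1) = [] := List.drop_eq_nil_of_le (by omega)
      have hg : row[j]?.getD 0 = (0 : Int) := by
        rw [List.getElem?_eq_none (by omega)]; rfl
      simp [pyFindInRow, List.getD_eq_getElem?_getD, hg, hd, ih (j + 1), hd']

theorem findInRow_eq (row : List Int) (w : Nat) :
    pyFindInRow row (List.range w) = ((row.take w).zipIdx).find? (fun p => p.1 != 0) := by
  have := findInRow_eq_aux row w 0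
  simpa [List.range_eq_range'] using this

-- the two searches agree on every grid
theorem find_eq (rows : List (List Int)) (w : Nat) : pyFindFirst rows w = altFind rows w := by
  induction rows with
  | nil => simp [pyFindFirst, altFind]
  | cons row rest ih =>
    simp only [pyFindFirst, altFind, List.findSome?_cons, findInRow_eq]
    cases ((row.take w).zipIdx).find? (fun p => p.1 != 0) with
    | none => simpa [altFind] using ih
    | some p => rfl

-- a found column index lies below w
theorem findInRow_mem (row : List Int) (js : List Nat) (v : Int) (j : Nat)
    (h : pyFindInRow row js = some (v, j)) : j ∈ js := by
  induction js with
  | nil => simp [pyFindInRow] at h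
  | cons a rest ih =>
    simp only [pyFindInRow] at h
    split at h
    · simp at h; simp [h.2]
    · simp [ih h]

theorem findFirst_lt (rows : List (List Int)) (w : Nat) (v : Int) (c0 : Nat)
    (h : pyFindFirst rows w = some (v, c0)) : c0 < w := by
  induction rows with
  | nil => simp [pyFindFirst] at h
  | cons row rest ih =>
    simp only [pyFindFirst] at h
    cases hr : pyFindInRow row (List.range w) with
    | none => rw [hr] at h; exact ih h
    | some p =>
      rw [hr] at h
      simp at h
      have := findInRow_mem row (List.range w) v c0 (by rw [hr, h])
      simpa using this

-- getD through map-set and modify-set (set/modify on a missing row are no-ops on [])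
theorem getD_map_set (out : List (List Int)) (col : Nat) (v : Int) :
    ∀ r : Nat, (out.map (fun row => row.set col v)).getD r [] = (out.getD r []).set col v := by
  induction out with
  | nil => intro r; simp
  | cons a t ih => intro r; cases r with
    | zero => simp
    | succ r => simpa using ih r

theorem getD_modify_set (out : List (List Int)) (r0 col : Nat) (x : Int) :
    ∀ r : Nat, (out.modify r0 (fun row => row.set col x)).getD r [] =
      if r = r0 then (out.getD r []).set col x else out.getD r [] := by
  intro r
  rw [List.getD_eq_getElem?_getD, List.getD_eq_getElem?_getD, List.getElem?_modify]
  by_cases h : r = r0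
  · subst h
    cases hq : out[r]? with
    | none => simp
    | some row => simp
  · simp [h, Ne.symm h]

theorem getD_set_cell (row : List Int) (i c : Nat) (x : Int) :
    (row.set i x).getD c 0 = if c = i ∧ i < row.length then x else row.getD c 0 := by
  rw [List.getD_eq_getElem?_getD, List.getD_eq_getElem?_getD, List.getElem?_set]
  by_cases h : i = c
  · subst h
    by_cases hl : i < row.length
    · simp [hl]
    · rw [if_pos rfl, if_neg hl, if_neg (fun hc => hl hc.2),
        List.getElem?_eq_none (by omega)]
  · rw [if_neg h, if_neg (fun hc => h hc.1.symm)]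

-- cell characterisation of the column fill
theorem cellE_setColAll (out : List (List Int)) (h w col : Nat) (v : Int)
    (hs : Shape out h w) (r c : Nat) :
    cellE (setColAll out col v) r c =
      if r < h ∧ c = col ∧ col < w then v else cellE out r c := by
  have hlen0 : out.length = h := hs.1
  unfold cellE setColAll
  rw [getD_map_set]
  by_cases hr : r < h
  · have hm : out.getD r [] ∈ out := by
      rw [List.getD_eq_getElem?_getD, List.getElem?_eq_getElem (by omega : r < out.length)]
      exact List.getElem_mem _
    have hlen : (out.getD r []).length = w := hs.2 _ hm
    rw [getD_set_cell, hlen]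
    by_cases hc : c = col ∧ col < w <;> simp [hc, hr]
  · have h0 : out.getD r [] = [] := by
      rw [List.getD_eq_getElem?_getD, List.getElem?_eq_none (by omega)]; rfl
    rw [h0, if_neg (by omega)]
    rfl

theorem shape_setColAll (out : List (List Int)) (h w col : Nat) (v : Int)
    (hs : Shape out h w) (_hcol : col < w) : Shape (setColAll out col v) h w := by
  refine ⟨by simpa [setColAll] using hs.1, ?_⟩
  intro row hm
  simp only [setColAll, List.mem_map] at hm
  obtain ⟨row0, hm0, rfl⟩ := hm
  simp [hs.2 _ hm0]

theorem fillCols_char (out : List (List Int)) (col w : Nat) (v : Int) (h : Nat)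
    (hs : Shape out h w) :
    Shape (fillCols out col w v) h w ∧
      ∀ r c, cellE (fillCols out col w v) r c =
        if r < h ∧ c < w ∧ col ≤ c ∧ (c - col) % 2 = 0 then v else cellE out r c := by
  fun_induction fillCols out col w v with
  | case1 out col hlt ih =>
    have hs' := shape_setColAll out h w col v hs hlt
    obtain ⟨ihs, ihc⟩ := ih hs'
    refine ⟨ihs, fun r c => ?_⟩
    rw [ihc r c, cellE_setColAll out h w col v hs r c]
    by_cases h1 : r < h ∧ c < w ∧ col + 2 ≤ c ∧ (c - (col + 2)) % 2 = 0
    · rw [if_pos h1, if_pos ⟨h1.1, h1.2.1, by omega, by omega⟩]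
    · rw [if_neg h1]
      by_cases h2 : r < h ∧ c = col ∧ col < w
      · rw [if_pos h2, if_pos ⟨h2.1, by omega, by omega, by omega⟩]
      · rw [if_neg h2, if_neg (by omega)]
  | case2 out col hlt =>
    exact ⟨hs, fun r c => by rw [if_neg (by omega)]⟩

-- cell characterisation of the 5-placing pass
theorem cellE_modify_set (out : List (List Int)) (h w r0 col : Nat) (x : Int)
    (hs : Shape out h w) (r c : Nat) :
    cellE (out.modify r0 (fun row => row.set col x)) r c =
      if r = r0 ∧ r0 < h ∧ c = col ∧ col < w then x else cellE out r c := by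
  have hlen0 : out.length = h := hs.1
  unfold cellE
  rw [getD_modify_set]
  by_cases hr : r = r0
  · subst hr
    by_cases hrh : r < h
    · have hm : out.getD r [] ∈ out := by
        rw [List.getD_eq_getElem?_getD, List.getElem?_eq_getElem (by omega : r < out.length)]
        exact List.getElem_mem _
      have hlen : (out.getD r []).length = w := hs.2 _ hm
      rw [if_pos rfl, getD_set_cell, hlen]
      by_cases hc : c = col ∧ col < w <;> simp [hc, hrh]
    · have h0 : out.getD r [] = [] := by
        rw [List.getD_eq_getElem?_getD, List.getElem?_eq_none (by omega)]; rfl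
      rw [if_pos rfl, h0, if_neg (by omega)]
      rfl
  · simp [hr]

theorem shape_modify_set (out : List (List Int)) (h w r0 col : Nat) (x : Int)
    (hs : Shape out h w) (_hcol : col < w) :
    Shape (out.modify r0 (fun row => row.set col x)) h w := by
  refine ⟨by simpa using hs.1, ?_⟩
  intro row hm
  rw [List.mem_iff_getElem?] at hm
  obtain ⟨i, hi⟩ := hm
  by_cases h : r0 = i
  · subst h
    rw [List.getElem?_modify_eq] at hi
    cases hq : out[r0]? with
    | none => rw [hq] at hi; simp at hi
    | some row0 =>
      rw [hq] at hi
      simp at hi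
      rw [← hi]
      simp [hs.2 _ (List.mem_of_getElem? hq)]
  · rw [List.getElem?_modify_ne _ out h] at hi
    exact hs.2 _ (List.mem_of_getElem? hi)

theorem fillFives_char (out : List (List Int)) (c0 offset w h : Nat)
    (hs : Shape out h w) (hh : 0 < h) (hoff : 1 ≤ offset) :
    Shape (fillFives out c0 offset w h) h w ∧
      ∀ r c, cellE (fillFives out c0 offset w h) r c =
        if c0 + offset ≤ c ∧ c < w ∧
            (((c - c0) % 4 = 1 ∧ r = 0) ∨ ((c - c0) % 4 = 3 ∧ r = h - 1))
          then 5 else cellE out r c := by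
  fun_induction fillFives out c0 offset w h with
  | case1 out offset hlt col out' ih =>
    have hcol : col < w := hlt
    have e : out' = (if _h : offset % 4 = 1 then out.modify 0 fun row => row.set col 5
        else if _h : offset % 4 = 3 then out.modify (h - 1) fun row => row.set col 5
        else out) := rfl
    have hout' : ∀ r c, cellE out' r c =
        if r < h ∧ c = col ∧ ((offset % 4 = 1 ∧ r = 0) ∨ (offset % 4 = 3 ∧ r = h - 1))
          then 5 else cellE out r c := by
      intro r c
      rw [e]
      by_cases h1 : offset % 4 = 1
      · rw [dif_pos h1, cellE_modify_set out h w 0 col 5 hs r c]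
        by_cases hr : r = 0 ∧ c = col
        · rw [if_pos ⟨hr.1, hh, hr.2, hcol⟩, if_pos ⟨by omega, hr.2, Or.inl ⟨h1, hr.1⟩⟩]
        · rw [if_neg (by tauto), if_neg (by omega)]
      · rw [dif_neg h1]
        by_cases h3 : offset % 4 = 3
        · rw [dif_pos h3, cellE_modify_set out h w (h - 1) col 5 hs r c]
          by_cases hr : r = h - 1 ∧ c = col
          · rw [if_pos ⟨hr.1, by omega, hr.2, hcol⟩, if_pos ⟨by omega, hr.2, Or.inr ⟨h3, hr.1⟩⟩]
          · rw [if_neg (by tauto), if_neg (by omega)]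
        · rw [dif_neg h3, if_neg (by omega)]
    have hs' : Shape out' h w := by
      rw [e]
      split_ifs
      · exact shape_modify_set out h w 0 col 5 hs hcol
      · exact shape_modify_set out h w (h - 1) col 5 hs hcol
      · exact hs
    obtain ⟨ihs, ihc⟩ := ih hs' (by omega)
    refine ⟨ihs, fun r c => ?_⟩
    rw [ihc r c, hout' r c]
    by_cases hcc : c = col
    · have hd : c - c0 = offset := by omega
      by_cases hbig : (offset % 4 = 1 ∧ r = 0) ∨ (offset % 4 = 3 ∧ r = h - 1)
      · rw [if_neg (by omega), if_pos ⟨by omega, hcc, hbig⟩, if_pos (by omega)]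
      · rw [if_neg (by omega), if_neg (by tauto), if_neg (by omega)]
    · by_cases h2 : c0 + (offset + 1) ≤ c ∧ c < w ∧
          (((c - c0) % 4 = 1 ∧ r = 0) ∨ ((c - c0) % 4 = 3 ∧ r = h - 1))
      · rw [if_pos h2, if_pos ⟨by omega, h2.2.1, h2.2.2⟩]
      · rw [if_neg h2, if_neg (by tauto), if_neg (fun hx => h2 ⟨by omega, hx.2.1, hx.2.2⟩)]
  | case2 out offset hge =>
    exact ⟨hs, fun r c => by rw [if_neg (by omega)]⟩

-- the all-zero start grid
theorem shape_zeros (h w : Nat) : Shape (List.replicate h (List.replicate w (0 : Int))) h w := by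
  refine ⟨by simp, ?_⟩
  intro row hm
  rw [List.eq_of_mem_replicate hm]; simp

theorem cellE_zeros (h w r c : Nat) :
    cellE (List.replicate h (List.replicate w (0 : Int))) r c = 0 := by
  unfold cellE
  simp only [List.getD_eq_getElem?_getD, List.getElem?_replicate]
  split_ifs with h1 <;> simp

-- a grid of known shape with known cells is the map-of-ranges grid
theorem eq_map_range (out : List (List Int)) (h w : Nat) (f : Nat → Nat → Int)
    (hs : Shape out h w) (hc : ∀ r < h, ∀ c < w, cellE out r c = f r c) :
    out = (List.range h).map (fun r => (List.range w).map (fun c => f r c)) := by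
  apply List.ext_getElem
  · simp [hs.1]
  · intro r h1 h2
    simp only [List.getElem_map, List.getElem_range]
    apply List.ext_getElem
    · simp [hs.2 _ (List.getElem_mem h1)]
    · intro c hc1 hc2
      have hrh : r < h := by simpa [hs.1] using h1
      have hcw : c < w := by simpa [hs.2 _ (List.getElem_mem h1)] using hc1
      have := hc r hrh c hcw
      simp only [List.getElem_map, List.getElem_range]
      rw [← this]
      unfold cellE
      simp only [List.getD_eq_getElem?_getD]
      rw [List.getElem?_eq_getElem h1, Option.getD_some,
        List.getElem?_eq_getElem hc1, Option.getD_some]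

theorem transform_eq (grid : List (List Int)) : transform grid = transform_alt grid := by
  unfold transform transform_alt
  dsimp only
  rw [← find_eq]
  cases hf : pyFindFirst grid (grid.getD 0 []).length with
  | none => rfl
  | some p =>
    obtain ⟨v, c0⟩ := p
    dsimp only
    set h := grid.length with hh
    set w := (grid.getD 0 []).length with hw
    have hc0 : c0 < w := findFirst_lt grid w v c0 hf
    have hpos : 0 < h := by
      cases grid with
      | nil => simp [pyFindFirst] at hf
      | cons a t => simp [hh]
    obtain ⟨hs1, hc1⟩ := fillCols_char (List.replicate h (List.replicate w (0 : Int)))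
      c0 w v h (shape_zeros h w)
    obtain ⟨hs2, hc2⟩ := fillFives_char _ c0 1 w h hs1 hpos le_rfl
    apply eq_map_range _ h w _ hs2
    intro r hr c hc
    rw [hc2 r c, hc1 r c, cellE_zeros]
    unfold altCell
    by_cases hlt : c < c0
    · rw [if_neg (by omega), if_neg (by omega), if_pos hlt]
    · rw [if_neg hlt]
      simp only
      by_cases he : (c - c0) % 2 = 0
      · rw [if_neg (by omega), if_pos ⟨hr, hc, by omega, he⟩, if_pos he]
      · by_cases h1 : (c - c0) % 4 = 1 ∧ r = 0
        · rw [if_pos ⟨by omega, hc, Or.inl h1⟩, if_neg he, if_pos h1]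
        · by_cases h3 : (c - c0) % 4 = 3 ∧ r = h - 1
          · rw [if_pos ⟨by omega, hc, Or.inr h3⟩, if_neg he, if_neg h1, if_pos h3]
          · rw [if_neg (by tauto), if_neg (by omega), if_neg he, if_neg h1, if_neg h3]

-- ===== VERDICT (by name: the statement is the Claim_ definition above) =====
theorem transform_spec : Claim_equal_transform := by
  intro grid _ _
  unfold Spec_transform
  exact transform_eq grid
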